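-- pv_equiv track=rewrite | github.com/eunzi-kim/AL-S | 은지/LV2/2개 이하로 다른 비트2.py | solution
-- ===== SOURCE A (Python) =====
-- def two(n):
--     if n < 2:
--         return n
--     else:
--         return (n%2) + two(n//2) * 10
--
-- def solution(numbers):
--     answer = []
--     for number in numbers:
--         if number % 2 == 0:
--             answer.append(number + 1)
--         else:
--             two_n = str(two(number))
--             if len(two_n) == two_n.count("1"):
--                 v = "10" + two_n[1:]
--             else:
--                 for i in range(len(two_n)-1, -1, -1):
--                     if two_n[i-1] == "0" and two_n[i] == "1":
--                         v = two_n[:i-1] + "10" + two_n[i+1:]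
--                         break
--             val = 0
--             for j in range(len(v)-1, -1, -1):
--                 val += int(v[j]) * (2 ** (len(v)-j-1))
--             answer.append(val)
--     return answer
-- ===== SOURCE B (Python) =====
-- def low(n):
--     # for odd n: 2**(t-1) where t = number of trailing 1-bits of n
--     if (n // 2) % 2 == 1:
--         return 2 * low(n // 2)
--     else:
--         return 1
--
-- def solution(numbers):
--     return [n + 1 if n % 2 == 0 else n + low(n) for n in numbers]
-- ===== Notes on version B (the rewrite author's own statement) =====
-- stated objective: simpler
-- what changed: A converts each odd number to a decimal integer whose digits are its binary representation, stringifies it, scans the string right-to-left for the pattern '01' (or prepends for all-ones), and reparses the edited string as binary; B replaces the whole pipeline with a two-line arithmetic recursion computing 2**(t-1) from the trailing 1-bits and adding it.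
-- outside the precondition, e.g. on solution([3, -3]): A returns [5, 5], B returns [5, -2]; on solution([-3]): A raises UnboundLocalError, B returns [-2]
import Mathlib
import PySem

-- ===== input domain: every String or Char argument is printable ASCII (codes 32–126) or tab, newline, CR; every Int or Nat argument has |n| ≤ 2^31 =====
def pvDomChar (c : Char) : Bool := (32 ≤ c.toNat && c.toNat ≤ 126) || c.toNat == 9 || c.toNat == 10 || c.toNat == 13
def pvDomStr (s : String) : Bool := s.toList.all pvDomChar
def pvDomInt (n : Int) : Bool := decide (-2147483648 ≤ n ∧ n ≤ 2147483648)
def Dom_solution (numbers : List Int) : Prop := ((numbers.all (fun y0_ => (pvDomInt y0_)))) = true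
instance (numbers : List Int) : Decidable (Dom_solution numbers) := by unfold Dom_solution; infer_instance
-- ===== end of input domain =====

-- B replaces A's build-a-decimal-"binary"-string / scan / reparse pipeline with a two-line
-- arithmetic recursion on the trailing 1-bits; equivalence on lists without negative odd numbers.

-- ===== PORT A =====
def two (n : Int) : Int :=
  if n < 2 then n
  else PySem.Int.mod n 2 + two (PySem.Int.floordiv n 2) * 10
termination_by n.toNat
decreasing_by
  rw [PySem.Int.floordiv_eq_ediv_of_pos (by omega : (0:Int) < 2)]
  omega

-- 'break': once the loop has produced a value, later iterations are skipped
def firstHit {α β : Type} (f : α → Option β) (acc : Option β) (i : α) : Option β :=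
  match acc with
  | some w => some w
  | none => f i

-- the inner 'for i in range(len(two_n)-1, -1, -1): … break' loop (first match wins)
def aScan (s : List Char) : Option (List Char) :=
  (PySem.List.pyRange (PySem.Chars.len s - 1) (-1) (-1)).foldl
    (firstHit (fun i =>
      if (PySem.List.pyGet? s (i - 1) == some '0') && (PySem.List.pyGet? s i == some '1') then
        some (PySem.List.slice s none (some (i - 1)) ++ ['1', '0'] ++ PySem.List.slice s (some (i + 1)) none)
      else none))
    none

-- the 'val += int(v[j]) * 2**(len(v)-j-1)' loop; j is always in range, int(v[j]) via ofChars?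
-- (getD 0 is only reached where Python would raise ValueError, outside Pre_)
def aVal (v : List Char) : Int :=
  (PySem.List.pyRange (PySem.Chars.len v - 1) (-1) (-1)).foldl
    (fun val j =>
      val + (PySem.Int.ofChars? [PySem.List.pyGetD v j '0']).getD 0
              * 2 ^ (PySem.Chars.len v - j - 1).toNat)
    0

-- one iteration of A's main loop; the second component is the Python variable v
-- (threaded across iterations: Python keeps the previous v when the scan never breaks)
def aStep (st : List Int × Option (List Char)) (number : Int) : List Int × Option (List Char) :=
  if PySem.Int.mod number 2 == 0 then (st.1 ++ [number + 1], st.2)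
  else
    let two_n := PySem.Int.toChars (two number)
    let v : Option (List Char) :=
      if PySem.Chars.len two_n == (PySem.Chars.count two_n ['1'] : Int) then
        some (['1', '0'] ++ PySem.List.slice two_n (some 1) none)
      else
        match aScan two_n with
        | some w => some w
        | none => st.2
    match v with
    | some w => (st.1 ++ [aVal w], some w)
    | none => (st.1 ++ [0], none)   -- Python raises UnboundLocalError here; outside Pre_

def solution (numbers : List Int) : List Int :=
  (numbers.foldl aStep ([], none)).1

-- ===== PORT B =====
-- Source B's recursive low(n); the fuel only bounds the recursion depth (|n| + 2 exceeds the
-- depth whenever Python's recursion terminates; Python recurses unboundedly only on n = -1)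
def low (fuel : Nat) (n : Int) : Int :=
  match fuel with
  | 0 => 1
  | f + 1 =>
    if PySem.Int.mod (PySem.Int.floordiv n 2) 2 == 1 then 2 * low f (PySem.Int.floordiv n 2)
    else 1

def solution_alt (numbers : List Int) : List Int :=
  numbers.map (fun n => if PySem.Int.mod n 2 == 0 then n + 1 else n + low (n.natAbs + 2) n)

-- ===== PRECONDITION & SPEC =====
-- Pre_ excludes lists containing a negative odd number — outside the problem's natural domain —
-- on which A raises (UnboundLocalError/ValueError) or returns a stale value left in the loop
-- variable v by an earlier odd element.
def Pre_solution (numbers : List Int) : Prop :=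
  ∀ x ∈ numbers, PySem.Int.mod x 2 = 1 → 0 ≤ x
instance (numbers : List Int) : Decidable (Pre_solution numbers) := by
  unfold Pre_solution; infer_instance

def pvWitness_solution : List Int := [3, 8, 2147483647]

def Spec_solution (numbers : List Int) (out : List Int) : Prop := out = solution_alt numbers
instance (numbers : List Int) (out : List Int) : Decidable (Spec_solution numbers out) := by
  unfold Spec_solution; infer_instance

-- ===== CLAIM (what is proved, stated in full; the proofs are below) =====
def Claim_equal_solution : Prop :=
  ∀ (numbers : List Int), Dom_solution numbers → Pre_solution numbers →
    Spec_solution numbers (solution numbers)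

-- ===== LEMMAS AND PROOFS =====

-- proof-side helpers: B's low on Nat, binary strings, decimal strings
def lo (k : Nat) : Int :=
  if (k / 2) % 2 = 1 then 2 * lo (k / 2) else 1
termination_by k
decreasing_by omega

def bits (k : Nat) : List Char :=
  if k < 2 then [Nat.digitChar k] else bits (k / 2) ++ [Nat.digitChar (k % 2)]
termination_by k
decreasing_by omega

def myDig (n : Nat) : List Char :=
  if n < 10 then [Nat.digitChar n] else myDig (n / 10) ++ [Nat.digitChar (n % 10)]
termination_by n
decreasing_by omega

def dv (c : Char) : Int := (PySem.Int.ofChars? [c]).getD 0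

-- the Option (List Char) that A's odd branch stores in v, as a function of k = number.toNat
def aOddv (k : Nat) : Option (List Char) :=
  if PySem.Chars.len (bits k) == (PySem.Chars.count (bits k) ['1'] : Int) then
    some (['1', '0'] ++ PySem.List.slice (bits k) (some 1) none)
  else aScan (bits k)

theorem toDigitsCore_eq (f : Nat) : ∀ (n : Nat) (acc : List Char), n < 10 ^ (f + 1) →
    Nat.toDigitsCore 10 (f + 1) n acc = myDig n ++ acc := by
  induction f with
  | zero =>
    intro n acc h
    have hn : n < 10 := by simpa using h
    have h0 : n / 10 = 0 := Nat.div_eq_of_lt hn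
    rw [Nat.toDigitsCore, myDig]
    simp [h0, hn, Nat.mod_eq_of_lt hn]
  | succ f ih =>
    intro n acc h
    rw [Nat.toDigitsCore]
    by_cases h0 : n / 10 = 0
    · have hn : n < 10 := by omega
      rw [myDig]
      simp [h0, hn, Nat.mod_eq_of_lt hn]
    · have hn : ¬ n < 10 := by omega
      simp only [h0, if_false]
      rw [ih (n / 10) _ (by
        have : 10 * (n / 10) ≤ n := Nat.mul_div_le n 10
        have hp : n < 10 ^ (f + 1 + 1) := h
        rw [pow_succ] at hp
        omega)]
      conv_rhs => rw [myDig]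
      rw [if_neg hn]
      simp

theorem toDigits10 (n : Nat) : Nat.toDigits 10 n = myDig n := by
  have hlt : n < 10 ^ (n + 1) := by
    calc n < 10 ^ n := Nat.lt_pow_self (by norm_num)
    _ ≤ 10 ^ (n + 1) := Nat.pow_le_pow_right (by norm_num) (by omega)
  have := toDigitsCore_eq n n [] hlt
  rw [Nat.toDigits, this]
  simp

theorem toChars_nonneg (m : Int) (h : 0 ≤ m) : PySem.Int.toChars m = myDig m.toNat := by
  have h0 : ¬ m < 0 := by omega
  simp [PySem.Int.toChars, h0, toDigits10]

theorem twoFn_pos : ∀ (k : Nat) (n : Int), n.toNat ≤ k → 1 ≤ n → 1 ≤ two n := by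
  intro k
  induction k with
  | zero => intro n h h1; omega
  | succ k ih =>
    intro n h h1
    rw [two]
    by_cases h2 : n < 2
    · rw [if_pos h2]; omega
    · rw [if_neg h2]
      rw [PySem.Int.floordiv_eq_ediv_of_pos (by omega : (0:Int) < 2),
          PySem.Int.mod_eq_emod_of_pos (by omega : (0:Int) < 2)]
      have := ih (n / 2) (by omega) (by omega)
      omega

theorem toChars_two : ∀ (k : Nat) (n : Int), n.toNat ≤ k → 1 ≤ n →
    PySem.Int.toChars (two n) = bits n.toNat := by
  intro k
  induction k with
  | zero => intro n h h1; omega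
  | succ k ih =>
    intro n h h1
    rw [two]
    by_cases h2 : n < 2
    · have hn1 : n = 1 := by omega
      subst hn1
      rw [if_pos (by omega)]
      rw [toChars_nonneg 1 (by omega)]
      rw [show (1:Int).toNat = 1 from rfl]
      rw [myDig, bits]
      norm_num
    · rw [if_neg h2]
      rw [PySem.Int.floordiv_eq_ediv_of_pos (by omega : (0:Int) < 2),
          PySem.Int.mod_eq_emod_of_pos (by omega : (0:Int) < 2)]
      have hT1 : 1 ≤ two (n / 2) := twoFn_pos k (n / 2) (by omega) (by omega)
      set T := two (n / 2) with hT
      rw [toChars_nonneg _ (by omega)]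
      have harg : (n % 2 + T * 10).toNat = T.toNat * 10 + (n % 2).toNat := by omega
      rw [harg, myDig]
      rw [if_neg (by omega)]
      have hdiv : (T.toNat * 10 + (n % 2).toNat) / 10 = T.toNat := by omega
      have hmod : (T.toNat * 10 + (n % 2).toNat) % 10 = (n % 2).toNat := by omega
      rw [hdiv, hmod]
      have hfd : PySem.Int.floordiv n 2 = n / 2 := PySem.Int.floordiv_eq_ediv_of_pos (by omega)
      have hmy : myDig T.toNat = bits (n / 2).toNat := by
        rw [← toChars_nonneg T (by omega), hT, ← hfd,
            ih (PySem.Int.floordiv n 2) (by rw [hfd]; omega) (by rw [hfd]; omega), hfd]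
      rw [hmy]
      conv_rhs => rw [bits]
      rw [if_neg (by omega)]
      have e1 : (n / 2).toNat = n.toNat / 2 := by omega
      have e2 : (n % 2).toNat = n.toNat % 2 := by omega
      rw [e1, e2]

theorem bits_ne_nil (k : Nat) : bits k ≠ [] := by
  rw [bits]
  split <;> simp

theorem bits_getLast (k : Nat) : (bits k).getLast? = some (Nat.digitChar (k % 2)) := by
  rw [bits]
  split
  · next h =>
    rw [Nat.mod_eq_of_lt h]
    rfl
  · exact List.getLast?_concat

theorem count_go (f : Nat) : ∀ (l : List Char) (acc : Nat), l.length ≤ f →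
    PySem.Chars.count.go ['1'] f l acc = acc + l.count '1' := by
  induction f with
  | zero =>
    intro l acc h
    have : l = [] := by
      cases l with
      | nil => rfl
      | cons c t => simp at h
    subst this
    rw [PySem.Chars.count.go]
    simp
  | succ f ih =>
    intro l acc h
    cases l with
    | nil =>
      rw [PySem.Chars.count.go]
      simp
      omega
    | cons c t =>
      rw [PySem.Chars.count.go]
      by_cases hc : c = '1'
      · subst hc
        have hpre : List.isPrefixOf ['1'] ('1' :: t) = true := by
          simp [List.isPrefixOf]
        simp only [hpre, if_true]
        rw [show List.drop (['1'] : List Char).length ('1' :: t) = t from rfl]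
        rw [ih t (acc + 1) (by simpa using h)]
        simp
        omega
      · have hpre : List.isPrefixOf ['1'] (c :: t) = false := by
          simp [List.isPrefixOf]
          exact fun hh => hc hh.symm
        simp only [hpre, Bool.false_eq_true, if_false]
        rw [ih t acc (by simpa using h)]
        simp [hc]

theorem count_ones (s : List Char) : PySem.Chars.count s ['1'] = s.count '1' := by
  rw [PySem.Chars.count]
  simp only [List.isEmpty_cons]
  rw [count_go s.length s 0 (le_refl _)]
  simp

theorem allones_iff (s : List Char) :
    (PySem.Chars.len s == (PySem.Chars.count s ['1'] : Int)) = true ↔ ∀ c ∈ s, c = '1' := by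
  rw [PySem.Chars.len, count_ones]
  rw [beq_iff_eq]
  constructor
  · intro h c hc
    have hcount : List.count '1' s = s.length := by exact_mod_cast h.symm
    exact (List.count_eq_length.mp hcount c hc).symm
  · intro h
    have hcount : List.count '1' s = s.length := List.count_eq_length.mpr (fun b hb => (h b hb).symm)
    exact_mod_cast hcount.symm

theorem aVal_eq (v : List Char) :
    aVal v = ((List.range v.length).map
      (fun k => dv (v.getD (v.length - 1 - k) '0') * 2 ^ k)).sum := by
  simp only [aVal, PySem.Chars.len]
  rw [PySem.List.pyRange_neg_one]
  have h1 : ((v.length : Int) - 1 - (-1)).toNat = v.length := by omega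
  rw [h1, List.foldl_map, PySem.List.foldl_add]
  rw [zero_add]
  apply congrArg
  apply List.map_congr_left
  intro k hk
  simp only [List.mem_range] at hk
  have e1 : ((v.length : Int) - 1 - k) = ((v.length - 1 - k : Nat) : Int) := by omega
  rw [e1, PySem.List.pyGetD_natCast]
  have e2 : ((v.length : Int) - ((v.length - 1 - k : Nat) : Int) - 1).toNat = k := by omega
  rw [e2, dv]

theorem aVal_concat (xs : List Char) (c : Char) : aVal (xs ++ [c]) = 2 * aVal xs + dv c := by
  rw [aVal_eq, aVal_eq]
  simp only [List.length_append, List.length_cons, List.length_nil, Nat.zero_add]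
  rw [List.range_succ_eq_map]
  simp only [List.map_cons, List.sum_cons, List.map_map]
  have h0 : (xs ++ [c]).getD (xs.length + 1 - 1 - 0) '0' = c := by
    simp only [List.getD]
    rw [show xs.length + 1 - 1 - 0 = xs.length by omega, List.getElem?_concat_length]
    rfl
  rw [h0]
  have hsucc : ∀ k ∈ List.range xs.length,
      ((fun k => dv ((xs ++ [c]).getD (xs.length + 1 - 1 - k) '0') * 2 ^ k) ∘ Nat.succ) k
        = 2 * (dv (xs.getD (xs.length - 1 - k) '0') * 2 ^ k) := by
    intro k hk
    simp only [List.mem_range] at hk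
    simp only [Function.comp_apply]
    have harg : xs.length + 1 - 1 - Nat.succ k = xs.length - 1 - k := by omega
    have hlt : xs.length - 1 - k < xs.length := by omega
    have e : (xs ++ [c]).getD (xs.length - 1 - k) '0' = xs.getD (xs.length - 1 - k) '0' := by
      simp only [List.getD]
      rw [List.getElem?_append_left hlt]
    rw [harg, e, pow_succ]
    ring
  rw [List.map_congr_left hsucc, List.sum_map_mul_left]
  ring

theorem aVal_bits : ∀ k : Nat, aVal (bits k) = k := by
  intro k
  induction k using Nat.strong_induction_on with
  | _ k ih =>
    by_cases h2 : k < 2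
    · interval_cases k
      · have hb : bits 0 = ['0'] := by
          rw [bits, if_pos (by norm_num : (0:Nat) < 2)]; decide
        rw [hb]; decide
      · have hb : bits 1 = ['1'] := by
          rw [bits, if_pos (by norm_num : (1:Nat) < 2)]; decide
        rw [hb]; decide
    · rw [bits, if_neg h2, aVal_concat, ih (k / 2) (by omega)]
      rcases Nat.mod_two_eq_zero_or_one k with hm | hm <;> rw [hm]
      · have : dv (Nat.digitChar 0) = 0 := by decide
        rw [this]; push_cast; omega
      · have : dv (Nat.digitChar 1) = 1 := by decide
        rw [this]; push_cast; omega

theorem foldl_match_gen {α β : Type} (l : List α) (f : α → Option β) (acc : Option β) :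
    l.foldl (firstHit f) acc
      = (match acc with | some w => some w | none => l.findSome? f) := by
  induction l generalizing acc with
  | nil => cases acc <;> rfl
  | cons x t ih =>
    cases acc with
    | some w =>
      rw [List.foldl_cons]
      exact ih (some w)
    | none =>
      rw [List.foldl_cons, List.findSome?_cons]
      cases hfx : f x with
      | some w => simpa [firstHit, hfx] using ih (some w)
      | none => simpa [firstHit, hfx] using ih none

theorem findSome?_map_congr {α β γ : Type} (l : List α) (f : α → Option β)
    (g : α → Option γ) (h : β → γ) (hfg : ∀ i ∈ l, g i = (f i).map h) :
    l.findSome? g = (l.findSome? f).map h := by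
  induction l with
  | nil => rfl
  | cons x t ih =>
    rw [List.findSome?_cons, List.findSome?_cons, hfg x (by simp)]
    cases f x with
    | some w => rfl
    | none =>
      simp only [Option.map_none]
      exact ih (fun i hi => hfg i (by simp [hi]))

theorem pyGet?_concat_lt (s : List Char) (c : Char) (j : Int) (h1 : 0 ≤ j)
    (h2 : j < s.length) : PySem.List.pyGet? (s ++ [c]) j = PySem.List.pyGet? s j := by
  rw [PySem.List.pyGet?_of_nonneg _ h1, PySem.List.pyGet?_of_nonneg _ h1]
  exact List.getElem?_append_left (by omega)

theorem foldl_match {α β : Type} (l : List α) (f : α → Option β) :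
    l.foldl (firstHit f) none = l.findSome? f :=
  foldl_match_gen l f none

theorem aScan_eq (s : List Char) :
    aScan s = (PySem.List.pyRange (PySem.Chars.len s - 1) (-1) (-1)).findSome?
      (fun i =>
        if (PySem.List.pyGet? s (i - 1) == some '0') && (PySem.List.pyGet? s i == some '1') then
          some (PySem.List.slice s none (some (i - 1)) ++ ['1', '0'] ++ PySem.List.slice s (some (i + 1)) none)
        else none) := by
  rw [aScan]
  exact foldl_match _ _

theorem aScan_top (xs : List Char) : aScan (xs ++ ['0', '1']) = some (xs ++ ['1', '0']) := by
  rw [aScan_eq]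
  have hlen : PySem.Chars.len (xs ++ ['0', '1']) - 1 = (xs.length : Int) + 1 := by
    simp [PySem.Chars.len]; omega
  rw [hlen]
  rw [PySem.List.pyRange_neg_one_cons (by omega : (-1:Int) < (xs.length : Int) + 1)]
  rw [List.findSome?_cons]
  have e1 : (xs.length : Int) + 1 - 1 = ((xs.length : Nat) : Int) := by omega
  have hg1 : PySem.List.pyGet? (xs ++ ['0', '1']) ((xs.length : Int) + 1 - 1) = some '0' := by
    rw [e1]
    exact PySem.List.pyGet?_append_length xs ['1'] '0' 
  have hg2 : PySem.List.pyGet? (xs ++ ['0', '1']) ((xs.length : Int) + 1) = some '1' := by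
    have e2 : (xs.length : Int) + 1 = (((xs ++ ['0']).length : Nat) : Int) := by simp
    rw [show xs ++ ['0', '1'] = (xs ++ ['0']) ++ '1' :: [] by simp, e2]
    exact PySem.List.pyGet?_append_length (xs ++ ['0']) [] '1' 
  rw [hg1, hg2]
  simp only [BEq.rfl, Bool.and_self, if_true]
  have hs1 : PySem.List.slice (xs ++ ['0', '1']) none (some ((xs.length : Int) + 1 - 1)) = xs := by
    rw [e1, PySem.List.slice_to_natCast]
    exact List.take_left
  have hs2 : PySem.List.slice (xs ++ ['0', '1']) (some ((xs.length : Int) + 1 + 1)) none = [] := by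
    have e3 : (xs.length : Int) + 1 + 1 = ((xs.length + 2 : Nat) : Int) := by omega
    rw [e3, PySem.List.slice_from_natCast]
    apply List.drop_eq_nil_of_le
    simp
  rw [hs1, hs2]
  simp

theorem aScan_step (s : List Char) (hs : s ≠ []) (hl : s.getLast? = some '1') :
    aScan (s ++ ['1']) = (aScan s).map (· ++ ['1']) := by
  have hL : 0 < s.length := List.length_pos_of_ne_nil hs
  rw [aScan_eq, aScan_eq]
  have hlen1 : PySem.Chars.len (s ++ ['1']) - 1 = (s.length : Int) := by
    simp [PySem.Chars.len]
  have hlen2 : PySem.Chars.len s - 1 = (s.length : Int) - 1 := by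
    simp [PySem.Chars.len]
  rw [hlen1, hlen2]
  rw [PySem.List.pyRange_neg_one_cons (by omega : (-1:Int) < (s.length : Int))]
  rw [List.findSome?_cons]
  have hg : PySem.List.pyGet? (s ++ ['1']) ((s.length : Int) - 1) = some '1' := by
    rw [pyGet?_concat_lt s '1' _ (by omega) (by omega)]
    rw [PySem.List.pyGet?_of_nonneg _ (by omega : (0:Int) ≤ (s.length : Int) - 1)]
    rw [show ((s.length : Int) - 1).toNat = s.length - 1 by omega]
    rw [← List.getLast?_eq_getElem?, hl]
  rw [hg]
  simp only [show ((some '1' : Option Char) == some '0') = false from rfl, Bool.false_and,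
    Bool.false_eq_true, if_false]
  apply findSome?_map_congr
  intro i hi
  rw [PySem.List.mem_pyRange_neg_one] at hi
  by_cases hi0 : i = 0
  · subst hi0
    rw [show (0:Int) - 1 = -1 from rfl]
    rw [PySem.List.pyGet?_neg_one, PySem.List.pyGet?_neg_one, List.getLast?_concat, hl]
    simp
  · have hi1 : 1 ≤ i := by omega
    have e1 : PySem.List.pyGet? (s ++ ['1']) (i - 1) = PySem.List.pyGet? s (i - 1) :=
      pyGet?_concat_lt s '1' _ (by omega) (by omega)
    have e2 : PySem.List.pyGet? (s ++ ['1']) i = PySem.List.pyGet? s i :=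
      pyGet?_concat_lt s '1' _ (by omega) (by omega)
    rw [e1, e2]
    by_cases hc : ((PySem.List.pyGet? s (i - 1) == some '0') && (PySem.List.pyGet? s i == some '1')) = true
    · rw [if_pos hc, if_pos hc]
      have hs1 : PySem.List.slice (s ++ ['1']) none (some (i - 1))
          = PySem.List.slice s none (some (i - 1)) := by
        rw [PySem.List.slice_to _ (by omega : (0:Int) ≤ i - 1),
            PySem.List.slice_to _ (by omega : (0:Int) ≤ i - 1)]
        exact List.take_append_of_le_length (by omega)
      have hs2 : PySem.List.slice (s ++ ['1']) (some (i + 1)) none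
          = PySem.List.slice s (some (i + 1)) none ++ ['1'] := by
        rw [PySem.List.slice_from _ (by omega : (0:Int) ≤ i + 1),
            PySem.List.slice_from _ (by omega : (0:Int) ≤ i + 1)]
        exact List.drop_append_of_le_length (by omega)
      rw [hs1, hs2]
      simp
    · rw [if_neg hc, if_neg hc]
      rfl

theorem aOddv_spec : ∀ k : Nat, k % 2 = 1 → ∃ w, aOddv k = some w ∧ aVal w = k + lo k := by
  intro k
  induction k using Nat.strong_induction_on with
  | _ k ih =>
    intro hk
    by_cases h1 : k = 1
    · subst h1
      have hb : bits 1 = ['1'] := by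
        rw [bits, if_pos (by norm_num : (1:Nat) < 2)]; decide
      have hlo : lo 1 = 1 := by rw [lo]; norm_num
      refine ⟨['1', '0'], ?_, ?_⟩
      · rw [aOddv, hb, if_pos (by decide)]
        decide
      · rw [hlo]; decide
    · have hk3 : 3 ≤ k := by omega
      have hd1 : Nat.digitChar (k % 2) = '1' := by rw [hk]; decide
      have hb : bits k = bits (k / 2) ++ ['1'] := by
        rw [bits, if_neg (by omega), hd1]
      by_cases hq : k % 4 = 1
      · -- k ≡ 1 (mod 4), k ≥ 5: two_n ends in "01", the scan fires immediately
        have hk5 : 5 ≤ k := by omega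
        have hb2 : bits (k / 2) = bits (k / 4) ++ ['0'] := by
          rw [bits, if_neg (by omega)]
          rw [Nat.div_div_eq_div_mul]
          rw [show Nat.digitChar (k / 2 % 2) = '0' by rw [show k / 2 % 2 = 0 by omega]; decide]
        have hs : bits k = bits (k / 4) ++ ['0', '1'] := by
          rw [hb, hb2]; simp
        have hno : ¬ ∀ c ∈ bits k, c = '1' := by
          intro hall
          have := hall '0' (by rw [hs]; simp)
          simp at this
        refine ⟨bits (k / 4) ++ ['1', '0'], ?_, ?_⟩
        · rw [aOddv, if_neg (fun hcc => hno ((allones_iff _).mp hcc))]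
          rw [hs, aScan_top]
        · rw [show bits (k / 4) ++ ['1', '0'] = (bits (k / 4) ++ ['1']) ++ ['0'] by simp]
          rw [aVal_concat, aVal_concat, aVal_bits]
          rw [show dv '1' = 1 from by decide, show dv '0' = 0 from by decide]
          rw [lo, if_neg (by omega)]
          have hc4 : (k : Int) = 4 * ((k / 4 : Nat) : Int) + 1 := by omega
          linarith
      · -- k ≡ 3 (mod 4): strip the trailing 1 and recurse
        have hq3 : k % 4 = 3 := by omega
        have hm : (k / 2) % 2 = 1 := by omega
        obtain ⟨w', hw', hv'⟩ := ih (k / 2) (by omega) hm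
        have hlast : (bits (k / 2)).getLast? = some '1' := by
          rw [bits_getLast, hm]
          decide
        have hlok : lo k = 2 * lo (k / 2) := by rw [lo, if_pos hm]
        have hc2 : (k : Int) = 2 * ((k / 2 : Nat) : Int) + 1 := by omega
        by_cases hall : ∀ c ∈ bits (k / 2), c = '1'
        · have hallk : ∀ c ∈ bits k, c = '1' := by
            rw [hb]
            intro c hc
            rcases List.mem_append.mp hc with hcl | hcr
            · exact hall c hcl
            · simpa using hcr
          rw [aOddv, if_pos ((allones_iff _).mpr hall)] at hw'
          have hw'' : w' = ['1', '0'] ++ (bits (k / 2)).tail := by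
            rw [PySem.List.slice_from_one] at hw'
            exact (Option.some.inj hw').symm
          refine ⟨['1', '0'] ++ PySem.List.slice (bits k) (some 1) none,
            by rw [aOddv, if_pos ((allones_iff _).mpr hallk)], ?_⟩
          rw [PySem.List.slice_from_one]
          have ht : (bits k).tail = (bits (k / 2)).tail ++ ['1'] := by
            obtain ⟨a, t, he⟩ := List.exists_cons_of_ne_nil (bits_ne_nil (k / 2))
            rw [hb, he]
            simp
          rw [ht,
            show ['1', '0'] ++ ((bits (k / 2)).tail ++ ['1'])
              = (['1', '0'] ++ (bits (k / 2)).tail) ++ ['1'] by simp,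
            aVal_concat, ← hw'', hv', hlok,
            show dv '1' = 1 from by decide]
          linarith
        · have hnallk : ¬ ∀ c ∈ bits k, c = '1' := by
            intro hak
            exact hall (fun c hc => hak c (by rw [hb]; exact List.mem_append_left _ hc))
          rw [aOddv, if_neg (fun hcc => hall ((allones_iff _).mp hcc))] at hw'
          refine ⟨w' ++ ['1'], ?_, ?_⟩
          · rw [aOddv, if_neg (fun hcc => hnallk ((allones_iff _).mp hcc))]
            rw [hb, aScan_step (bits (k / 2)) (bits_ne_nil _) hlast, hw']
            rfl
          · rw [aVal_concat, hv', hlok, show dv '1' = 1 from by decide]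
            linarith

theorem low_eq (f : Nat) : ∀ k : Nat, k ≤ f → low f (k : Int) = lo k := by
  induction f with
  | zero =>
    intro k hk
    have hk0 : k = 0 := by omega
    subst hk0
    rw [lo]
    norm_num [low]
  | succ f ih =>
    intro k hk
    have h1 : PySem.Int.floordiv (k : Int) 2 = ((k / 2 : Nat) : Int) := by
      exact_mod_cast PySem.Int.floordiv_natCast k 2
    have h2 : PySem.Int.mod ((k / 2 : Nat) : Int) 2 = (((k / 2) % 2 : Nat) : Int) := by
      exact_mod_cast PySem.Int.mod_natCast (k / 2) 2
    rw [low, h1, h2]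
    by_cases hm : (k / 2) % 2 = 1
    · rw [if_pos (by simp [hm])]
      rw [ih (k / 2) (by omega)]
      conv_rhs => rw [lo]
      rw [if_pos hm]
    · rw [if_neg (by simp; omega)]
      conv_rhs => rw [lo]
      rw [if_neg hm]

theorem aStep_spec (st : List Int × Option (List Char)) (n : Int)
    (h : PySem.Int.mod n 2 = 1 → 0 ≤ n) :
    (aStep st n).1 = st.1 ++ [if PySem.Int.mod n 2 == 0 then n + 1 else n + low (n.natAbs + 2) n] := by
  rcases PySem.Int.mod_two_eq n with h0 | h1
  · simp only [aStep, h0]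
    rfl
  · have hn0 : 0 ≤ n := h h1
    have hne : n ≠ 0 := by
      intro he
      subst he
      exact absurd h1 (by decide)
    have hn1 : 1 ≤ n := by omega
    have hodd : n.toNat % 2 = 1 := by
      have he := PySem.Int.mod_eq_emod_of_pos (a := n) (by omega : (0:Int) < 2)
      rw [he] at h1
      omega
    obtain ⟨w, hw, hval⟩ := aOddv_spec n.toNat hodd
    have htc : PySem.Int.toChars (two n) = bits n.toNat := toChars_two n.toNat n (le_refl _) hn1
    have hlow : low (n.natAbs + 2) n = lo n.toNat := by
      have hh := low_eq (n.natAbs + 2) n.toNat (by omega)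
      rwa [Int.toNat_of_nonneg hn0] at hh
    simp only [aStep]
    rw [if_neg (by rw [h1]; decide)]
    rw [htc]
    unfold aOddv at hw
    have hv : (if PySem.Chars.len (bits n.toNat) == (PySem.Chars.count (bits n.toNat) ['1'] : Int) then
          some (['1', '0'] ++ PySem.List.slice (bits n.toNat) (some 1) none)
        else match aScan (bits n.toNat) with | some w' => some w' | none => st.2) = some w := by
      by_cases hcond : (PySem.Chars.len (bits n.toNat) == (PySem.Chars.count (bits n.toNat) ['1'] : Int)) = true
      · rw [if_pos hcond] at hw ⊢
        exact hw
      · rw [if_neg hcond] at hw ⊢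
        rw [hw]
    rw [hv]
    show st.1 ++ [aVal w] = _
    rw [hval, hlow, Int.toNat_of_nonneg hn0, if_neg (by rw [h1]; decide)]

theorem foldl_aStep (l : List Int) : ∀ st, (∀ x ∈ l, PySem.Int.mod x 2 = 1 → 0 ≤ x) →
    (l.foldl aStep st).1 = st.1 ++ l.map (fun n => if PySem.Int.mod n 2 == 0 then n + 1 else n + low (n.natAbs + 2) n) := by
  induction l with
  | nil => intro st h; simp
  | cons x t ih =>
    intro st h
    rw [List.foldl_cons, List.map_cons]
    rw [ih (aStep st x) (fun y hy => h y (by simp [hy]))]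
    rw [aStep_spec st x (h x (by simp))]
    simp

-- ===== VERDICT (by name: the statement is the Claim_ definition above) =====
theorem solution_spec : Claim_equal_solution := by
  intro numbers _ hpre
  unfold Spec_solution solution solution_alt
  rw [foldl_aStep numbers ([], none) hpre]
  rfl
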